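-- pv_equiv track=rewrite | github.com/BonaDrone/documentation | ESKF/ESKF_Jacobians/python_scripts/substitutions.py | change_var_names
-- ===== SOURCE A (Python) =====
-- SUBS = {
-- 	"dt" : "dt",
-- 	"qw" : "x[6]", # x[0-5] are positions and velocities
-- 	"qx" : "x[7]",
-- 	"qy" : "x[8]",
-- 	"qz" : "x[9]",
-- 	"wsx" : "_rates[0]",
-- 	"wsy" : "_rates[1]",
-- 	"wsz" : "_rates[2]",
-- 	"asx" : "_accels[0]", # to be defined
-- 	"asy" : "_accels[1]",
-- 	"asz" : "_accels[2]",
-- 	"wbx" : "x[13]",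
-- 	"wby" : "x[14]",
-- 	"wbz" : "x[15]",
-- 	"abx" : "x[10]",
-- 	"aby" : "x[11]",
-- 	"abz" : "x[12]",
-- 	"g": "",
-- }
--
-- NORMAL_CHARS = [" ","+","-","/", "*", "(", ")"]
--
-- NUM_CHARS = [str(i) for i in range(10)]
--
-- def change_var_names(element):
-- 	"""
-- 	Takes a Jacobian element and replaces Matlab variable
-- 	names by its Hackflight counterparts.
--
-- 	This method should be called after replace_powers to avoid conflicts
-- 	"""
--
-- 	mod_element = ""
-- 	var_start_idx = 0
-- 	var_end_idx = 0
--
-- 	found_var = False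
-- 	possible_var = False
--
-- 	for idx, letter in enumerate(element):
-- 		# get literal
-- 		if letter not in NORMAL_CHARS+NUM_CHARS and not possible_var:
-- 			# hit literal
-- 			possible_var = True
-- 			var_start_idx = idx
--
-- 		if not possible_var:
-- 			mod_element += letter
--
-- 		# end of literal
-- 		if possible_var and (letter in NUM_CHARS+NORMAL_CHARS or idx == len(element)-1):
-- 			var_end_idx = idx
-- 			found_var = True
--
-- 		if found_var:
-- 			if idx != len(element)-1:
-- 				mod_element += SUBS[element[var_start_idx:var_end_idx]]+letter
-- 			else:
-- 				if letter not in NORMAL_CHARS+NUM_CHARS: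
-- 					mod_element += SUBS[element[var_start_idx:var_end_idx]+letter]
-- 				else:
-- 					mod_element += SUBS[element[var_start_idx:var_end_idx]]+letter
-- 			possible_var = False
-- 			found_var = False
--
-- 	return mod_element
-- ===== SOURCE B (Python) =====
-- import re
--
-- SUBS = {
-- 	"dt" : "dt",
-- 	"qw" : "x[6]", # x[0-5] are positions and velocities
-- 	"qx" : "x[7]",
-- 	"qy" : "x[8]",
-- 	"qz" : "x[9]",
-- 	"wsx" : "_rates[0]",
-- 	"wsy" : "_rates[1]",
-- 	"wsz" : "_rates[2]",
-- 	"asx" : "_accels[0]", # to be defined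
-- 	"asy" : "_accels[1]",
-- 	"asz" : "_accels[2]",
-- 	"wbx" : "x[13]",
-- 	"wby" : "x[14]",
-- 	"wbz" : "x[15]",
-- 	"abx" : "x[10]",
-- 	"aby" : "x[11]",
-- 	"abz" : "x[12]",
-- 	"g": "",
-- }
--
-- # A variable name is a maximal run of characters that are neither delimiters
-- # (space + - / * ( )) nor digits; replace each such run by its SUBS entry and
-- # copy everything else verbatim.
-- _VAR = re.compile(r'[^ +\-/*()0-9]+')
--
-- def change_var_names(element):
-- 	return _VAR.sub(lambda m: SUBS[m.group()], element)
-- ===== Notes on version B (the rewrite author's own statement) =====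
-- stated objective: idiomatic
-- what changed: The character-by-character state machine with index bookkeeping and an end-of-string special case is replaced by a single re.sub over maximal non-delimiter runs with a dictionary-lookup replacement function.
import Mathlib
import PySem

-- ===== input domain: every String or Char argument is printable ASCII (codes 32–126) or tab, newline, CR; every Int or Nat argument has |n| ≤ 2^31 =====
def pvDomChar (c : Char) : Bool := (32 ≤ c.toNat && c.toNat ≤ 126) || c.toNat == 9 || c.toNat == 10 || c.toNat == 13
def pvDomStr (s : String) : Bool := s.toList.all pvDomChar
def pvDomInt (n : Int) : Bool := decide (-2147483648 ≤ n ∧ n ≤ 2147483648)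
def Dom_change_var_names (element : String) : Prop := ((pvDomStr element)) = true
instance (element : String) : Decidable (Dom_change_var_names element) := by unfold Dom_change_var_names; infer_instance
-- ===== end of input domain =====

-- B replaces A's character-by-character state machine (index bookkeeping, end-of-string
-- special case) by a single regex-style substitution over maximal non-delimiter runs
-- (re.sub in Python); objective: idiomatic. Equivalence on Pre_ (every variable token
-- present in SUBS; elsewhere Python A raises KeyError).

-- ===== PORT A =====

-- module constant SUBS (dict str -> str), kept on the List Char side
def SUBS : PySem.Dict (List Char) (List Char) :=
  PySem.Dict.ofList [("dt".toList, "dt".toList), ("qw".toList, "x[6]".toList), ("qx".toList, "x[7]".toList),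
   ("qy".toList, "x[8]".toList), ("qz".toList, "x[9]".toList),
   ("wsx".toList, "_rates[0]".toList), ("wsy".toList, "_rates[1]".toList), ("wsz".toList, "_rates[2]".toList),
   ("asx".toList, "_accels[0]".toList), ("asy".toList, "_accels[1]".toList), ("asz".toList, "_accels[2]".toList),
   ("wbx".toList, "x[13]".toList), ("wby".toList, "x[14]".toList), ("wbz".toList, "x[15]".toList),
   ("abx".toList, "x[10]".toList), ("aby".toList, "x[11]".toList), ("abz".toList, "x[12]".toList),
   ("g".toList, "".toList)]

def NORMAL_CHARS : List Char := [' ', '+', '-', '/', '*', '(', ')']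

def NUM_CHARS : List Char := ['0', '1', '2', '3', '4', '5', '6', '7', '8', '9']

-- SUBS[key]; Python raises KeyError on a missing key — Pre_ excludes those inputs,
-- so the total stand-in default [] is never reached inside the claim.
def pvSubsA (key : List Char) : List Char := (PySem.Dict.get? SUBS key).getD []

-- one iteration of A's for-loop (state = (mod_element, var_start_idx, var_end_idx, found_var, possible_var))
def stepA (s : List Char) (st : List Char × Int × Int × Bool × Bool) (p : Int × Char) :
    List Char × Int × Int × Bool × Bool :=
  match st, p with
  | (modE, varStart, varEnd, foundVar, possibleVar), (idx, letter) =>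
    -- get literal
    let (possibleVar, varStart) :=
      if letter ∉ NORMAL_CHARS ++ NUM_CHARS ∧ possibleVar = false then (true, idx)
      else (possibleVar, varStart)
    let modE := if possibleVar = false then modE ++ [letter] else modE
    -- end of literal
    let (varEnd, foundVar) :=
      if possibleVar = true ∧ (letter ∈ NUM_CHARS ++ NORMAL_CHARS ∨ idx = (s.length : Int) - 1) then
        (idx, true)
      else (varEnd, foundVar)
    if foundVar = true then
      let modE :=
        if idx ≠ (s.length : Int) - 1 then
          modE ++ pvSubsA (PySem.List.slice s (some varStart) (some varEnd)) ++ [letter]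
        else if letter ∉ NORMAL_CHARS ++ NUM_CHARS then
          modE ++ pvSubsA (PySem.List.slice s (some varStart) (some varEnd) ++ [letter])
        else
          modE ++ pvSubsA (PySem.List.slice s (some varStart) (some varEnd)) ++ [letter]
      (modE, varStart, varEnd, false, false)
    else (modE, varStart, varEnd, foundVar, possibleVar)

def change_var_names (element : String) : String :=
  let s := element.toList
  let st := (PySem.List.enumerate s 0).foldl (stepA s) ([], 0, 0, false, false)
  String.ofList st.1

-- ===== PORT B =====

-- the regex character class [^ +\-/*()0-9]: bVar is true exactly on variable characters
def bVar (c : Char) : Bool := !((" +-/*()0123456789".toList).contains c)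

-- the dict SUBS under the type convention: an insertion-ordered association list,
-- lookup = first match (written out on the char-list side)
def bTable : List (List Char × List Char) :=
  [(['d','t'], ['d','t']),
   (['q','w'], ['x','[','6',']']),
   (['q','x'], ['x','[','7',']']),
   (['q','y'], ['x','[','8',']']),
   (['q','z'], ['x','[','9',']']),
   (['w','s','x'], ['_','r','a','t','e','s','[','0',']']),
   (['w','s','y'], ['_','r','a','t','e','s','[','1',']']),
   (['w','s','z'], ['_','r','a','t','e','s','[','2',']']),
   (['a','s','x'], ['_','a','c','c','e','l','s','[','0',']']),
   (['a','s','y'], ['_','a','c','c','e','l','s','[','1',']']),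
   (['a','s','z'], ['_','a','c','c','e','l','s','[','2',']']),
   (['w','b','x'], ['x','[','1','3',']']),
   (['w','b','y'], ['x','[','1','4',']']),
   (['w','b','z'], ['x','[','1','5',']']),
   (['a','b','x'], ['x','[','1','0',']']),
   (['a','b','y'], ['x','[','1','1',']']),
   (['a','b','z'], ['x','[','1','2',']']),
   (['g'], [])]

-- first-match association lookup (KeyError in Python = the default [], excluded by Pre_)
def bLookup : List (List Char × List Char) → List Char → List Char
  | [], _ => []
  | (k, v) :: rest, tok => if tok == k then v else bLookup rest tok

-- re.sub(r'[^ +\-/*()0-9]+', lambda m: SUBS[m.group()], ·): copy delimiters verbatim,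
-- replace each maximal run of variable characters by its table entry
def bGo : List Char → List Char
  | [] => []
  | c :: cs =>
    if bVar c then
      bLookup bTable (c :: cs.takeWhile bVar) ++ bGo (cs.dropWhile bVar)
    else c :: bGo cs
termination_by l => l.length
decreasing_by
  · have := List.length_dropWhile_le bVar cs
    simp at this ⊢
    omega
  · simp

def change_var_names_alt (element : String) : String := String.ofList (bGo element.toList)

-- ===== PRECONDITION & SPEC =====
-- Pre_ excludes exactly the inputs on which Python A raises KeyError: those containing a
-- maximal non-delimiter run that is not a key of SUBS.
def Pre_change_var_names (element : String) : Prop :=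
  ∀ w ∈ element.toList.splitOnP (fun c => !bVar c), w = [] ∨ (PySem.Dict.get? SUBS w).isSome = true
instance (element : String) : Decidable (Pre_change_var_names element) := by
  unfold Pre_change_var_names; infer_instance

def pvWitness_change_var_names : String := "qw + 2*qx*(dt) - g"

def Spec_change_var_names (element : String) (out : String) : Prop := out = change_var_names_alt element
instance (element : String) (out : String) : Decidable (Spec_change_var_names element out) := by
  unfold Spec_change_var_names; infer_instance

-- ===== CLAIM (what is proved, stated in full; the proofs are below) =====
def Claim_equal_change_var_names : Prop := ∀ (element : String), Dom_change_var_names element → Pre_change_var_names element → Spec_change_var_names element (change_var_names element)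

-- ===== LEMMAS AND PROOFS =====

-- proof-only shorthand for A's delimiter test
def pvIsDelim (c : Char) : Bool := decide (c ∈ NORMAL_CHARS ++ NUM_CHARS)

theorem bVar_eq (c : Char) : bVar c = !pvIsDelim c := by
  simp [bVar, pvIsDelim, NORMAL_CHARS, NUM_CHARS]

-- first-match lookup in a literal Dict is bLookup of its items
theorem getD_mk_eq_bLookup (l : List (List Char × List Char)) (k : List Char) :
    ((PySem.Dict.mk l).get? k).getD [] = bLookup l k := by
  induction l with
  | nil => simp [PySem.Dict.get?, bLookup]
  | cons p rest ih =>
    obtain ⟨a, v⟩ := p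
    rw [PySem.Dict.get?_mk_cons, bLookup, Bool.beq_comm]
    by_cases h : (k == a) = true <;> simp [h, ih]

theorem subs_bridge (k : List Char) : pvSubsA k = bLookup bTable k := by
  have hS : SUBS = PySem.Dict.mk bTable := by decide
  rw [pvSubsA, hS, getD_mk_eq_bLookup]

-- delimiter char, outside a run
theorem step_delim_out (s modE : List Char) (vs ve : Int) (i : Nat) (c : Char)
    (hc : pvIsDelim c = true) :
    stepA s (modE, vs, ve, false, false) ((i : Int), c) = (modE ++ [c], vs, ve, false, false) := by
  have hd : c ∈ NORMAL_CHARS ∨ c ∈ NUM_CHARS := by simpa [pvIsDelim] using hc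
  rcases hd with h | h <;> simp [stepA, h]

-- delimiter char, inside a run (closes it); same result whether or not idx is last
theorem step_delim_in (s modE : List Char) (vs ve : Int) (i : Nat) (c : Char)
    (hc : pvIsDelim c = true) :
    stepA s (modE, vs, ve, false, true) ((i : Int), c)
      = (modE ++ pvSubsA (PySem.List.slice s (some vs) (some (i : Int))) ++ [c], vs, (i : Int), false, false) := by
  have hd : c ∈ NORMAL_CHARS ∨ c ∈ NUM_CHARS := by simpa [pvIsDelim] using hc
  by_cases hidx : ((i : Int)) = (s.length : Int) - 1 <;>
    rcases hd with h | h <;> simp [stepA, h, hidx]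

-- non-delimiter char, outside a run, not last: enters a run
theorem step_var_out (s modE : List Char) (vs ve : Int) (i : Nat) (c : Char)
    (hc : pvIsDelim c = false) (hidx : ¬((i : Int) = (s.length : Int) - 1)) :
    stepA s (modE, vs, ve, false, false) ((i : Int), c) = (modE, (i : Int), ve, false, true) := by
  have hd : ¬(c ∈ NORMAL_CHARS ∨ c ∈ NUM_CHARS) := by simpa [pvIsDelim] using hc
  rw [not_or] at hd
  simp [stepA, hd.1, hd.2, hidx]

-- non-delimiter char, outside a run, last index
theorem step_var_out_last (s modE : List Char) (vs ve : Int) (i : Nat) (c : Char)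
    (hc : pvIsDelim c = false) (hidx : ((i : Int)) = (s.length : Int) - 1) :
    (stepA s (modE, vs, ve, false, false) ((i : Int), c)).1
      = modE ++ pvSubsA (PySem.List.slice s (some (i : Int)) (some (i : Int)) ++ [c]) := by
  have hd : ¬(c ∈ NORMAL_CHARS ∨ c ∈ NUM_CHARS) := by simpa [pvIsDelim] using hc
  rw [not_or] at hd
  simp [stepA, hd.1, hd.2, hidx]

-- non-delimiter char, inside a run, not last: extends the run
theorem step_var_in (s modE : List Char) (vs ve : Int) (i : Nat) (c : Char)
    (hc : pvIsDelim c = false) (hidx : ¬((i : Int) = (s.length : Int) - 1)) :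
    stepA s (modE, vs, ve, false, true) ((i : Int), c) = (modE, vs, ve, false, true) := by
  have hd : ¬(c ∈ NORMAL_CHARS ∨ c ∈ NUM_CHARS) := by simpa [pvIsDelim] using hc
  rw [not_or] at hd
  simp [stepA, hd.1, hd.2, hidx]

-- non-delimiter char, inside a run, last index: closes with letter appended to the key
theorem step_var_in_last (s modE : List Char) (vs ve : Int) (i : Nat) (c : Char)
    (hc : pvIsDelim c = false) (hidx : ((i : Int)) = (s.length : Int) - 1) :
    (stepA s (modE, vs, ve, false, true) ((i : Int), c)).1
      = modE ++ pvSubsA (PySem.List.slice s (some vs) (some (i : Int)) ++ [c]) := by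
  have hd : ¬(c ∈ NORMAL_CHARS ∨ c ∈ NUM_CHARS) := by simpa [pvIsDelim] using hc
  rw [not_or] at hd
  simp [stepA, hd.1, hd.2, hidx]

theorem pv_main :
    ∀ (N : Nat) (s t : List Char) (i : Nat), t.length = N → s.drop i = t →
      (∀ (modE : List Char) (vs ve : Int),
        ((PySem.List.enumerate t (i : Int)).foldl (stepA s) (modE, vs, ve, false, false)).1
          = modE ++ bGo t) ∧
      (∀ (modE : List Char) (vs : Nat) (ve : Int) (r : List Char),
        r = (s.drop vs).take (i - vs) → vs ≤ i → (∀ c ∈ r, pvIsDelim c = false) → t ≠ [] →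
        ((PySem.List.enumerate t (i : Int)).foldl (stepA s) (modE, (vs : Int), ve, false, true)).1
          = modE ++ bLookup bTable (r ++ t.takeWhile bVar)
              ++ bGo (t.dropWhile bVar)) := by
  intro N
  induction N using Nat.strong_induction_on with
  | _ N IH =>
    intro s t i hlen hdrop
    have hlen_drop : s.length - i = t.length := by
      have := congrArg List.length hdrop; simpa using this
    constructor
    · -- outside a run
      intro modE vs ve
      cases t with
      | nil => simp [PySem.List.enumerate, bGo]
      | cons c t' =>
        have hN : t'.length + 1 = N := by simpa using hlen
        have hlt : i < s.length := by simp at hlen_drop; omega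
        have hdrop' : s.drop (i + 1) = t' := by
          have := congrArg List.tail hdrop
          simpa [List.tail_drop] using this
        have IH' := IH t'.length (by omega) s t' (i + 1) rfl hdrop'
        rw [PySem.List.enumerate_cons, List.foldl_cons,
            show ((i : Int) + 1) = ((i + 1 : Nat) : Int) by push_cast; ring]
        by_cases hc : pvIsDelim c
        · rw [step_delim_out s modE vs ve i c hc, IH'.1]
          simp [bGo, bVar_eq, hc]
        · by_cases ht' : t' = []
          · subst ht'
            have hidx : ((i : Int)) = (s.length : Int) - 1 := by
              simp at hlen_drop; omega
            have h1 : (PySem.List.enumerate ([] : List Char) ((i + 1 : Nat) : Int)) = [] := by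
              simp [PySem.List.enumerate]
            rw [h1, List.foldl_nil]
            rw [step_var_out_last s modE vs ve i c (by simpa using hc) hidx]
            rw [PySem.List.slice_natCast]
            simp [bGo, bVar_eq, hc, subs_bridge]
          · have hidx : ¬((i : Int)) = ((s.length : Int) - 1) := by
              have : 0 < t'.length := List.length_pos_iff.mpr ht'
              simp at hlen_drop; omega
            rw [step_var_out s modE vs ve i c (by simpa using hc) hidx]
            have hr1 : [c] = (s.drop i).take (i + 1 - i) := by
              rw [hdrop]; simp
            rw [IH'.2 modE i ve [c] hr1 (by omega)
                (by intro x hx; simp at hx; subst hx; simpa using hc) ht']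
            simp [bGo, bVar_eq, hc]
    · -- inside a run started at vs
      intro modE vs ve r hr hvsle hall hne
      cases t with
      | nil => exact absurd rfl hne
      | cons c t' =>
        have hN : t'.length + 1 = N := by simpa using hlen
        have hlt : i < s.length := by simp at hlen_drop; omega
        have hdrop' : s.drop (i + 1) = t' := by
          have := congrArg List.tail hdrop
          simpa [List.tail_drop] using this
        have IH' := IH t'.length (by omega) s t' (i + 1) rfl hdrop'
        rw [PySem.List.enumerate_cons, List.foldl_cons,
            show ((i : Int) + 1) = ((i + 1 : Nat) : Int) by push_cast; ring]
        by_cases hc : pvIsDelim c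
        · rw [step_delim_in s modE (vs : Int) ve i c hc, IH'.1]
          rw [PySem.List.slice_natCast, ← hr]
          simp [bGo, bVar_eq, hc, subs_bridge]
        · by_cases ht' : t' = []
          · subst ht'
            have hidx : ((i : Int)) = (s.length : Int) - 1 := by
              simp at hlen_drop; omega
            have h1 : (PySem.List.enumerate ([] : List Char) ((i + 1 : Nat) : Int)) = [] := by
              simp [PySem.List.enumerate]
            rw [h1, List.foldl_nil]
            rw [step_var_in_last s modE (vs : Int) ve i c (by simpa using hc) hidx]
            rw [PySem.List.slice_natCast, ← hr]
            simp [bGo, bVar_eq, hc, subs_bridge]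
          · have hidx : ¬((i : Int)) = ((s.length : Int) - 1) := by
              have : 0 < t'.length := List.length_pos_iff.mpr ht'
              simp at hlen_drop; omega
            rw [step_var_in s modE (vs : Int) ve i c (by simpa using hc) hidx]
            have hsi : s[i]? = some c := by
              have : (s.drop i)[0]? = some c := by rw [hdrop]; rfl
              simpa [List.getElem?_drop] using this
            have hr' : r ++ [c] = (s.drop vs).take (i + 1 - vs) := by
              rw [show i + 1 - vs = (i - vs) + 1 by omega, List.take_add_one]
              rw [List.getElem?_drop, show vs + (i - vs) = i by omega, hsi, hr]
              rfl
            rw [IH'.2 modE vs ve (r ++ [c]) hr' (by omega)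
                (by intro x hx; rcases List.mem_append.mp hx with h | h
                    · exact hall x h
                    · simp at h; subst h; simpa using hc) ht']
            simp [bVar_eq, hc]

-- ===== VERDICT (by name: the statement is the Claim_ definition above) =====
theorem change_var_names_spec : Claim_equal_change_var_names := by
  intro element _ _
  unfold Spec_change_var_names change_var_names change_var_names_alt
  have h := (pv_main element.toList.length element.toList element.toList 0 rfl (by simp)).1 [] 0 0
  simpa using congrArg String.ofList h
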